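-- pv_equiv track=rewrite | github.com/yona211/ProjectGmarPython | managerPage.py | find_winner_from_class
-- ===== SOURCE A (Python) =====
-- def find_winner_from_class(class_to_check, competitor_data):
--     counter = 1
--     votes_max_number = 0
--     winner = competitor_data[0]
--     for competitor in competitor_data:
--         if str(competitor[3]) == class_to_check:
--             if str(winner[3]) != class_to_check:
--                 winner = competitor
--             if competitor[2] >= winner[2]:
--                 winner = competitor
--     return winner
-- ===== SOURCE B (Python) =====
-- def find_winner_from_class(class_to_check, competitor_data):
--     ranked = sorted((c for c in competitor_data if str(c[3]) == class_to_check),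
--                     key=lambda c: c[2])
--     return ranked[-1] if ranked else competitor_data[0]
-- ===== Notes on version B (the rewrite author's own statement) =====
-- stated objective: alternative
-- what changed: B replaces A's stateful winner-resetting scan by sorting the matching competitors with a stable sort on the vote count and returning the last element of the sorted list (stability makes the last sorted element the last maximal tie, A's >= rule).
import Mathlib
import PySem

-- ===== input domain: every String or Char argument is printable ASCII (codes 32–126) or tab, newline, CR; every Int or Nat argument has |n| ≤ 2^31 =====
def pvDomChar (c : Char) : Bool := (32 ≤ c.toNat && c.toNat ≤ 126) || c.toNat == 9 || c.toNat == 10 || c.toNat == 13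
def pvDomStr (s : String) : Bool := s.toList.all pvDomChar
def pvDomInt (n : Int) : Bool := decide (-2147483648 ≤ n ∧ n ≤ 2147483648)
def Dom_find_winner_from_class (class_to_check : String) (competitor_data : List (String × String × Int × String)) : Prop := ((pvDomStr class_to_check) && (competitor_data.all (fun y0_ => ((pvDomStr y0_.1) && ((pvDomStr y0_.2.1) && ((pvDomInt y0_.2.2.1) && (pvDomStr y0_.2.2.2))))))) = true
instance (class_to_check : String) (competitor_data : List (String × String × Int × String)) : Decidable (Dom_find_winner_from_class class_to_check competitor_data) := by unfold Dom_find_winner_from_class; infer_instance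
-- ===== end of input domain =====

-- ===== PORT A =====
-- B replaces A's stateful winner-resetting scan by a stable sort on votes and taking
-- the last sorted element; equivalence on nonempty lists (Pre_ excludes [], where A raises IndexError).
def find_winner_from_class (class_to_check : String) (competitor_data : List (String × String × Int × String)) : String × String × Int × String :=
  -- winner = competitor_data[0]  (Pre_ guarantees nonempty; [] is unreachable under the claim)
  let winner0 := competitor_data.headD ("", "", 0, "")
  competitor_data.foldl (fun winner competitor =>
    if competitor.2.2.2 == class_to_check then
      let winner := if winner.2.2.2 != class_to_check then competitor else winner
      if winner.2.2.1 ≤ competitor.2.2.1 then competitor else winner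
    else winner) winner0

-- ===== PORT B =====
def find_winner_from_class_alt (class_to_check : String) (competitor_data : List (String × String × Int × String)) : String × String × Int × String :=
  let ranked := PySem.List.sorted (competitor_data.filter (fun c => c.2.2.2 == class_to_check)) (fun c => c.2.2.1)
  if ranked.isEmpty then competitor_data.headD ("", "", 0, "")
  else (PySem.List.pyGet? ranked (-1)).getD ("", "", 0, "")

-- ===== PRECONDITION & SPEC =====
-- Pre_ excludes the empty list, on which A raises IndexError.
def Pre_find_winner_from_class (class_to_check : String) (competitor_data : List (String × String × Int × String)) : Prop := competitor_data ≠ []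
instance (class_to_check : String) (competitor_data : List (String × String × Int × String)) : Decidable (Pre_find_winner_from_class class_to_check competitor_data) := by unfold Pre_find_winner_from_class; infer_instance
def pvWitness_find_winner_from_class : String × (List (String × String × Int × String)) := ("a", [("x", "y", 1, "a")])
def Spec_find_winner_from_class (class_to_check : String) (competitor_data : List (String × String × Int × String)) (out : String × String × Int × String) : Prop := out = find_winner_from_class_alt class_to_check competitor_data
instance (class_to_check : String) (competitor_data : List (String × String × Int × String)) (out : String × String × Int × String) : Decidable (Spec_find_winner_from_class class_to_check competitor_data out) := by unfold Spec_find_winner_from_class; infer_instance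

-- ===== CLAIM (what is proved, stated in full; the proofs are below) =====
def Claim_equal_find_winner_from_class : Prop := ∀ (class_to_check : String) (competitor_data : List (String × String × Int × String)), Dom_find_winner_from_class class_to_check competitor_data → Pre_find_winner_from_class class_to_check competitor_data → Spec_find_winner_from_class class_to_check competitor_data (find_winner_from_class class_to_check competitor_data)

-- ===== LEMMAS AND PROOFS =====

abbrev pvT : Type := String × String × Int × String
-- A's loop body and the "later-ties-win max" step it reduces to on matching elements.
def pvA (c : String) (w x : pvT) : pvT :=
  if x.2.2.2 == c then
    let w := if w.2.2.2 != c then x else w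
    if w.2.2.1 ≤ x.2.2.1 then x else w
  else w
def pvG (w x : pvT) : pvT := if w.2.2.1 ≤ x.2.2.1 then x else w
def pvK (x : pvT) : Int := x.2.2.1
def pvBef (a b : pvT) : Bool := decide (pvK a < pvK b)

theorem pv_foldA_match (c : String) (l : List pvT) (acc : pvT) (h : (acc.2.2.2 == c) = true) :
    l.foldl (pvA c) acc = (l.filter (fun x => x.2.2.2 == c)).foldl pvG acc := by
  induction l generalizing acc with
  | nil => rfl
  | cons x t ih =>
    by_cases hx : (x.2.2.2 == c) = true
    · have hstep : pvA c acc x = pvG acc x := by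
        simp [pvA, pvG, hx, eq_of_beq h]
      have hcls : ((pvG acc x).2.2.2 == c) = true := by
        simp only [pvG]; split_ifs <;> assumption
      simp only [List.foldl_cons, List.filter_cons, hx, if_pos]
      rw [hstep, ih _ hcls]
    · have hstep : pvA c acc x = acc := by simp [pvA, hx]
      simp only [List.foldl_cons, List.filter_cons, hx]
      simp only [Bool.false_eq_true, if_false] at *
      rw [hstep, ih _ h]

theorem pv_foldA_nomatch (c : String) (l : List pvT) (acc : pvT) (h : (acc.2.2.2 == c) = false) :
    l.foldl (pvA c) acc =
      match l.filter (fun x => x.2.2.2 == c) with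
      | [] => acc
      | m :: ms => ms.foldl pvG m := by
  induction l generalizing acc with
  | nil => rfl
  | cons x t ih =>
    by_cases hx : (x.2.2.2 == c) = true
    · have hstep : pvA c acc x = x := by
        have hne : acc.2.2.2 ≠ c := by simpa using h
        simp [pvA, hx, hne]
      simp only [List.foldl_cons, List.filter_cons, hx, if_pos]
      rw [hstep, pv_foldA_match c t x hx]
    · have hstep : pvA c acc x = acc := by simp [pvA, hx]
      simp only [List.foldl_cons, List.filter_cons, hx]
      simp only [Bool.false_eq_true, if_false]
      rw [hstep, ih _ h]

-- In a key-nondecreasing list the last element has the largest key (≥ the head's).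
theorem pv_last_key_ge (ys : List pvT) (y w : pvT)
    (hp : List.Pairwise (fun a b => pvK a ≤ pvK b) (y :: ys))
    (hl : (y :: ys).getLast? = some w) : pvK y ≤ pvK w := by
  induction ys generalizing y with
  | nil => simp_all
  | cons z zs ih =>
    have h1 : pvK y ≤ pvK z := (List.pairwise_cons.mp hp).1 z (by simp)
    have h2 := ih z (List.pairwise_cons.mp hp).2 (by simpa using hl)
    omega

-- Inserting x into a key-nondecreasing list: the new last element is pvG (old last) x.
theorem pv_insert_last (acc : List pvT) (x : pvT)
    (hp : List.Pairwise (fun a b => pvK a ≤ pvK b) acc) :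
    (PySem.List.insertBy pvBef x acc).getLast?
      = some (match acc.getLast? with | none => x | some w => pvG w x) := by
  induction acc with
  | nil => simp [PySem.List.insertBy]
  | cons y ys ih =>
    by_cases hb : pvBef x y = true
    · rcases hl : (y :: ys).getLast? with _ | w
      · simp at hl
      · have h1 : pvK x < pvK y := by simpa [pvBef] using hb
        have h2 := pv_last_key_ge ys y w hp hl
        have hng : ¬ (w.2.2.1 ≤ x.2.2.1) := by simp only [pvK] at h1 h2; omega
        have hrw : PySem.List.insertBy pvBef x (y :: ys) = x :: y :: ys := by
          simp [PySem.List.insertBy, hb]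
        have hx : (x :: y :: ys).getLast? = some w := by
          rw [List.getLast?_cons_cons, hl]
        rw [hrw, hx]
        simp [pvG, hng]
    · have hyx : y.2.2.1 ≤ x.2.2.1 := by
        simp only [pvBef, pvK, decide_eq_true_eq] at hb; omega
      have hrw : PySem.List.insertBy pvBef x (y :: ys)
          = y :: PySem.List.insertBy pvBef x ys := by
        simp [PySem.List.insertBy, hb]
      rcases ys with _ | ⟨z, zs⟩
      · rw [hrw]
        simp [PySem.List.insertBy, pvG, hyx]
      · have ihz := ih (List.pairwise_cons.mp hp).2
        rcases hr : PySem.List.insertBy pvBef x (z :: zs) with _ | ⟨a, as⟩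
        · rw [hr] at ihz; simp at ihz
        · rw [hrw, hr, List.getLast?_cons_cons, ← hr, ihz, List.getLast?_cons_cons]

-- The last element of the stable sort of m::ms is the left fold of pvG (last maximal).
theorem pv_sorted_last (ms : List pvT) (m : pvT) :
    (PySem.List.sorted (m :: ms) pvK).getLast? = some (ms.foldl pvG m) := by
  induction ms using List.reverseRecOn with
  | nil =>
    rw [PySem.List.sorted_eq_foldl_insertBy]
    simp [PySem.List.insertBy]
  | append_singleton ms x ih =>
    have hsplit : PySem.List.sorted (m :: (ms ++ [x])) pvK
        = PySem.List.insertBy pvBef x (PySem.List.sorted (m :: ms) pvK) := by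
      rw [PySem.List.sorted_eq_foldl_insertBy, PySem.List.sorted_eq_foldl_insertBy]
      show List.foldl _ [] ((m :: ms) ++ [x]) = _
      rw [List.foldl_append]
      rfl
    rw [hsplit, pv_insert_last _ _ (PySem.List.sorted_pairwise (m :: ms) pvK), ih]
    simp

-- ranked[-1] on a nonempty list is its last element.
theorem pv_pyGet_neg_one (l : List pvT) (hne : l ≠ []) :
    PySem.List.pyGet? l (-1) = l.getLast? := by
  have hlen : 0 < l.length := List.length_pos_iff.mpr hne
  have h1 : ¬ ((0:Int) ≤ -1) := by norm_num
  have h2 : -((l.length : Int)) ≤ -1 := by omega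
  simp only [PySem.List.pyGet?, PySem.List.pyIdx?, if_neg h1, if_pos h2]
  norm_num
  rw [List.getLast?_eq_getElem?]

-- ===== VERDICT (by name: the statement is the Claim_ definition above) =====
theorem find_winner_from_class_spec : Claim_equal_find_winner_from_class := by
  intro c data _ hpre
  unfold Spec_find_winner_from_class find_winner_from_class find_winner_from_class_alt
  rcases data with _ | ⟨h, t⟩
  · exact absurd rfl hpre
  have hA : (h :: t).foldl (fun winner competitor =>
      if competitor.2.2.2 == c then
        let winner := if winner.2.2.2 != c then competitor else winner
        if winner.2.2.1 ≤ competitor.2.2.1 then competitor else winner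
      else winner) h = (h :: t).foldl (pvA c) h := rfl
  simp only [List.headD_cons, hA]
  by_cases hh : (h.2.2.2 == c) = true
  · rw [pv_foldA_match c _ h hh]
    have hfil : (h :: t).filter (fun x => x.2.2.2 == c)
        = h :: t.filter (fun x => x.2.2.2 == c) := by simp [hh]
    rw [hfil]
    have hsne : PySem.List.sorted (h :: t.filter (fun x => x.2.2.2 == c)) pvK ≠ [] := by
      rw [Ne, PySem.List.sorted_eq_nil_iff]; simp
    have hlast := pv_sorted_last (t.filter (fun x => x.2.2.2 == c)) h
    rw [show (fun c : pvT => c.2.2.1) = pvK from rfl]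
    rw [if_neg (by simpa [List.isEmpty_iff] using hsne)]
    rw [pv_pyGet_neg_one _ hsne, hlast]
    have hGhh : List.foldl pvG h (h :: t.filter (fun x => x.2.2.2 == c))
        = List.foldl pvG h (t.filter (fun x => x.2.2.2 == c)) := by
      simp [List.foldl_cons, pvG]
    rw [hGhh]
    rfl
  · rw [pv_foldA_nomatch c _ h (by simpa using hh)]
    have hfil : (h :: t).filter (fun x => x.2.2.2 == c)
        = t.filter (fun x => x.2.2.2 == c) := by simp [hh]
    rw [hfil, show (fun c : pvT => c.2.2.1) = pvK from rfl]
    rcases hm : t.filter (fun x => x.2.2.2 == c) with _ | ⟨m, ms⟩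
    · rw [hm]
      have hnil : PySem.List.sorted ([] : List pvT) pvK = [] := by
        rw [PySem.List.sorted_eq_foldl_insertBy]; rfl
      rw [hnil]; simp
    · rw [hm]
      have hsne : PySem.List.sorted (m :: ms) pvK ≠ [] := by
        rw [Ne, PySem.List.sorted_eq_nil_iff]; simp
      rw [if_neg (by simpa [List.isEmpty_iff] using hsne)]
      rw [pv_pyGet_neg_one _ hsne, pv_sorted_last]
      rfl
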